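-- pv_equiv track=rewrite | github.com/tanvir007X851/mybot | numbot1.py | _parse_withdraw_details
-- ===== SOURCE A (Python) =====
-- def _parse_withdraw_details(details: str) -> tuple[str, str]:
--     method = ""
--     account = ""
--     if not details:
--         return method, account
--     for line in details.splitlines():
--         line = line.strip()
--         if line.lower().startswith("method:"):
--             method = line.split(":", 1)[1].strip()
--         elif line.lower().startswith("account:"):
--             account = line.split(":", 1)[1].strip()
--     return method, account
-- ===== SOURCE B (Python) =====
-- def _parse_withdraw_details(details: str) -> tuple[str, str]:
--     d = {}
--     for line in details.splitlines():
--         line = line.strip()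
--         if ":" in line:
--             key, value = line.split(":", 1)
--             d[key.lower()] = value.strip()
--     return d.get("method", ""), d.get("account", "")
-- ===== Notes on version B (the rewrite author's own statement) =====
-- stated objective: simpler
-- what changed: A's two hard-coded lowercase-startswith branches are replaced by a generic single pass that splits every colon line into key/value, stores the stripped value in a dict under the lowercased key (last wins, like A's reassignment), and reads the method and account entries out at the end.
import Mathlib
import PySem

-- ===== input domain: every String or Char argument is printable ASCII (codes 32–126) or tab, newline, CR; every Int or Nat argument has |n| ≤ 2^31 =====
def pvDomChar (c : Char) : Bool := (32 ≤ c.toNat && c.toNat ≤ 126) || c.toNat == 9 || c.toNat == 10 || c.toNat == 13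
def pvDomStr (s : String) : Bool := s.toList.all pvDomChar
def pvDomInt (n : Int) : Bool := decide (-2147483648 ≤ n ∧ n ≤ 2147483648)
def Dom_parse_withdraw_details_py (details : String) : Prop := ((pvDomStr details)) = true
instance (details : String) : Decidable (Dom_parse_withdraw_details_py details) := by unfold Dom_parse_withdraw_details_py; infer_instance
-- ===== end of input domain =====

-- B replaces A's per-keyword startswith branches by one generic colon split into a dict (objective: simpler).

-- ===== PORT A =====
-- one loop iteration of A: strip the line, then the method:/account: branches
-- (line.split(":", 1)[1] always exists in the branches A takes, so pyGetD is exact there)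
def pyA_line (st : String × String) (line : String) : String × String :=
  let s := PySem.Str.strip line
  if PySem.Str.startswith (PySem.Str.lower s) "method:" then
    (PySem.Str.strip (PySem.List.pyGetD ((PySem.Str.splitMax? s ":" 1).getD []) 1 ""), st.2)
  else if PySem.Str.startswith (PySem.Str.lower s) "account:" then
    (st.1, PySem.Str.strip (PySem.List.pyGetD ((PySem.Str.splitMax? s ":" 1).getD []) 1 ""))
  else st

def parse_withdraw_details_py (details : String) : String × String :=
  if details = "" then ("", "")
  else (PySem.Str.splitlines details).foldl pyA_line ("", "")

-- ===== PORT B =====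
-- one loop iteration of B: strip the line and, if it has a colon, store d[key.lower()] = value.strip()
def pyB_line (d : PySem.Dict String String) (line : String) : PySem.Dict String String :=
  let s := PySem.Str.strip line
  if PySem.Str.isIn ":" s then
    let parts := (PySem.Str.splitMax? s ":" 1).getD []
    d.insert (PySem.Str.lower (PySem.List.pyGetD parts 0 ""))
             (PySem.Str.strip (PySem.List.pyGetD parts 1 ""))
  else d

def parse_withdraw_details_py_alt (details : String) : String × String :=
  let d := (PySem.Str.splitlines details).foldl pyB_line PySem.Dict.empty
  (d.getD "method" "", d.getD "account" "")

-- ===== PRECONDITION & SPEC =====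
def Spec_parse_withdraw_details_py (details : String) (out : String × String) : Prop := out = parse_withdraw_details_py_alt details
instance (details : String) (out : String × String) : Decidable (Spec_parse_withdraw_details_py details out) := by unfold Spec_parse_withdraw_details_py; infer_instance

-- ===== CLAIM (what is proved, stated in full; the proofs are below) =====
def Claim_equal_parse_withdraw_details_py : Prop := ∀ (details : String), Dom_parse_withdraw_details_py details → Spec_parse_withdraw_details_py details (parse_withdraw_details_py details)

-- ===== LEMMAS AND PROOFS =====

lemma go_msplit_zero (sep : List Char) (fuel : Nat) (l cur : List Char) (acc : List (List Char)) :
    PySem.Chars.splitOnMax.go sep fuel 0 l cur acc = ((cur.reverse ++ l) :: acc).reverse := by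
  cases fuel with
  | zero => rfl
  | succ fuel => cases l with
    | nil => simp [PySem.Chars.splitOnMax.go]
    | cons c rest => rfl

lemma go_colon (fuel : Nat) : ∀ (l cur : List Char) (acc : List (List Char)), l.length < fuel →
    PySem.Chars.splitOnMax.go [':'] fuel 1 l cur acc =
      if ':' ∈ l then
        acc.reverse ++ [cur.reverse ++ l.takeWhile (· ≠ ':'), (l.dropWhile (· ≠ ':')).tail]
      else acc.reverse ++ [cur.reverse ++ l] := by
  induction fuel with
  | zero => intro l cur acc h; omega
  | succ fuel ih =>
    intro l cur acc h
    cases l with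
    | nil => simp [PySem.Chars.splitOnMax.go]
    | cons c rest =>
      by_cases hc : c = ':'
      · subst hc
        have h1 : PySem.Chars.splitOnMax.go [':'] (fuel+1) 1 (':' :: rest) cur acc =
            PySem.Chars.splitOnMax.go [':'] fuel 0 rest [] (cur.reverse :: acc) := rfl
        rw [h1, go_msplit_zero]
        simp [List.takeWhile, List.dropWhile]
      · have h1 : PySem.Chars.splitOnMax.go [':'] (fuel+1) 1 (c :: rest) cur acc =
            PySem.Chars.splitOnMax.go [':'] fuel 1 rest (c :: cur) acc := by
          have hp : [':'].isPrefixOf (c :: rest) = false := by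
            simp [List.isPrefixOf]; exact fun he => absurd he.symm hc
          conv_lhs => rw [show PySem.Chars.splitOnMax.go [':'] (fuel+1) 1 (c :: rest) cur acc =
            (if (1:Nat) = 0 then ((cur.reverse ++ (c::rest)) :: acc).reverse
             else if [':'].isPrefixOf (c::rest) then
               PySem.Chars.splitOnMax.go [':'] fuel 0 (List.drop 1 (c::rest)) [] (cur.reverse :: acc)
             else PySem.Chars.splitOnMax.go [':'] fuel 1 rest (c :: cur) acc) from rfl]
          simp [hp]
        rw [h1, ih rest (c :: cur) acc (by simpa using Nat.lt_of_succ_lt_succ h)]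
        simp [hc]
        by_cases hm : ':' ∈ rest <;> simp [hm, Ne.symm hc]

lemma splitColon (cs : List Char) :
    PySem.Chars.splitOnMax cs [':'] 1 =
      if ':' ∈ cs then [cs.takeWhile (· ≠ ':'), (cs.dropWhile (· ≠ ':')).tail]
      else [cs] := by
  have : PySem.Chars.splitOnMax cs [':'] 1 =
      PySem.Chars.splitOnMax.go [':'] (cs.length + 1) 1 cs [] [] := by
    simp [PySem.Chars.splitOnMax]
  rw [this, go_colon (cs.length + 1) cs [] [] (by omega)]
  by_cases hm : ':' ∈ cs <;> simp [hm]

lemma lowerChar_colon_iff (c : Char) : PySem.Chars.lowerChar c = ':' ↔ c = ':' := by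
  unfold PySem.Chars.lowerChar PySem.Chars.isupper
  split_ifs with h
  · simp only [Bool.and_eq_true, decide_eq_true_eq] at h
    have h1 : 65 ≤ c.toNat := by exact_mod_cast (Char.le_def.mp h.1)
    have h2 : c.toNat ≤ 90 := by exact_mod_cast (Char.le_def.mp h.2)
    constructor
    · intro he
      have hv : (Char.ofNat (c.toNat + 32)).toNat = c.toNat + 32 := by
        rw [Char.toNat_ofNat, if_pos (Or.inl (by omega))]
      have := congrArg Char.toNat he
      rw [hv] at this
      have : c.toNat + 32 = 58 := by simpa using this
      omega
    · intro he; subst he; simp at h1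
  · exact Iff.rfl

lemma mem_colon_lower (cs : List Char) : ':' ∈ PySem.Chars.lower cs ↔ ':' ∈ cs := by
  simp only [PySem.Chars.lower, List.mem_map]
  constructor
  · rintro ⟨a, ha, he⟩; exact (lowerChar_colon_iff a).mp he ▸ ha
  · intro h; exact ⟨':', h, by decide⟩

lemma prefix_colon : ∀ (M P u v : List Char), ':' ∉ M → ':' ∉ P →
    (M ++ ':' :: u) <+: (P ++ ':' :: v) → M = P := by
  intro M
  induction M with
  | nil =>
    intro P u v _ hP hpre
    cases P with
    | nil => rfl
    | cons p P' =>
      exfalso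
      simp only [List.nil_append, List.cons_append, List.cons_prefix_cons] at hpre
      exact hP (hpre.1 ▸ List.mem_cons_self)
  | cons m M' ih =>
    intro P u v hM hP hpre
    cases P with
    | nil =>
      exfalso
      simp only [List.cons_append, List.nil_append, List.cons_prefix_cons] at hpre
      exact hM (hpre.1 ▸ List.mem_cons_self)
    | cons p P' =>
      simp only [List.cons_append, List.cons_prefix_cons] at hpre
      have := ih P' u v (fun hx => hM (List.mem_cons_of_mem _ hx))
        (fun hx => hP (List.mem_cons_of_mem _ hx)) hpre.2
      rw [hpre.1, this]

set_option maxRecDepth 4096 in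
lemma decomp_colon (cs : List Char) (h : ':' ∈ cs) :
    cs = cs.takeWhile (· ≠ ':') ++ ':' :: (cs.dropWhile (· ≠ ':')).tail := by
  induction cs with
  | nil => cases h
  | cons c rest ih =>
    by_cases hc : c = ':'
    · subst hc
      rw [List.takeWhile_cons, List.dropWhile_cons]
      have hd : (decide ((':' : Char) ≠ ':') : Bool) = false := by decide
      rw [hd]
      simp only [Bool.false_eq_true, if_false, List.nil_append, List.tail_cons]
    · have hm : ':' ∈ rest := by cases h with
        | head => exact absurd rfl hc
        | tail _ h => exact h
      rw [List.takeWhile_cons, List.dropWhile_cons]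
      have hd : (decide (c ≠ ':') : Bool) = true := by simp [hc]
      rw [hd]
      simp only [if_true, List.cons_append]
      exact congrArg (c :: ·) (ih hm)

lemma not_mem_takeWhile_colon (cs : List Char) : ':' ∉ cs.takeWhile (· ≠ ':') := by
  intro h
  have := List.mem_takeWhile_imp h
  simp at this

lemma cond_iff (cs kw : List Char) (hk : ':' ∉ kw) :
    (PySem.Chars.startswith (PySem.Chars.lower cs) (kw ++ [':']) = true) ↔
      (':' ∈ cs ∧ PySem.Chars.lower (cs.takeWhile (· ≠ ':')) = kw) := by
  rw [PySem.Chars.startswith_iff]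
  constructor
  · intro h
    have hmem : ':' ∈ cs := by
      rw [← mem_colon_lower]
      exact h.sublist.subset (by simp)
    refine ⟨hmem, ?_⟩
    have hdec := decomp_colon cs hmem
    have hlow : PySem.Chars.lower cs =
        PySem.Chars.lower (cs.takeWhile (· ≠ ':')) ++ ':' :: PySem.Chars.lower ((cs.dropWhile (· ≠ ':')).tail) := by
      conv_lhs => rw [hdec]
      simp only [PySem.Chars.lower, List.map_append, List.map_cons,
        (by decide : PySem.Chars.lowerChar ':' = ':')]
    rw [hlow] at h
    have hnp : ':' ∉ PySem.Chars.lower (cs.takeWhile (· ≠ ':')) := by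
      rw [mem_colon_lower]; exact not_mem_takeWhile_colon cs
    have := prefix_colon kw (PySem.Chars.lower (cs.takeWhile (· ≠ ':'))) [] _ hk hnp (by simpa using h)
    exact this.symm
  · rintro ⟨hmem, hkw⟩
    have hdec := decomp_colon cs hmem
    have hlow : PySem.Chars.lower cs =
        kw ++ ':' :: PySem.Chars.lower ((cs.dropWhile (· ≠ ':')).tail) := by
      conv_lhs => rw [hdec]
      simp only [PySem.Chars.lower, List.map_append, List.map_cons,
        (by decide : PySem.Chars.lowerChar ':' = ':')]
      rw [show List.map PySem.Chars.lowerChar (cs.takeWhile (· ≠ ':')) = kw from hkw]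
    rw [hlow]
    exact ⟨PySem.Chars.lower ((cs.dropWhile (· ≠ ':')).tail), by simp⟩


set_option maxHeartbeats 1000000 in
lemma step_eq (d : PySem.Dict String String) (line : String) :
    pyA_line (d.getD "method" "", d.getD "account" "") line =
      ((pyB_line d line).getD "method" "", (pyB_line d line).getD "account" "") := by
  unfold pyA_line pyB_line
  simp only []
  generalize PySem.Str.strip line = s
  have hsw : ∀ kw : List Char, ':' ∉ kw →
      ((PySem.Str.startswith (PySem.Str.lower s) (String.ofList (kw ++ [':']))) = true ↔
        (':' ∈ s.toList ∧ PySem.Chars.lower (s.toList.takeWhile (· ≠ ':')) = kw)) := by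
    intro kw hk
    rw [PySem.Str.startswith_eq, PySem.Str.toList_lower,
      show (String.ofList (kw ++ [':'])).toList = kw ++ [':'] by simp]
    exact cond_iff s.toList kw hk
  have hIn : PySem.Str.isIn ":" s = true ↔ ':' ∈ s.toList := by
    rw [PySem.Str.isIn_iff_infix]
    constructor
    · intro h; exact h.sublist.subset (by decide)
    · intro h
      obtain ⟨l1, l2, h'⟩ := List.append_of_mem h
      rw [h']
      exact ⟨l1, l2, by simp⟩
  by_cases hmem : ':' ∈ s.toList
  · have hparts : (PySem.Str.splitMax? s ":" 1).getD [] =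
        [String.ofList (s.toList.takeWhile (· ≠ ':')), String.ofList ((s.toList.dropWhile (· ≠ ':')).tail)] := by
      simp only [PySem.Str.splitMax?, PySem.Chars.splitMax?]
      rw [if_neg (by decide)]
      simp only [Option.map_some, Option.getD_some, show ":".toList = [':'] from rfl]
      rw [splitColon, if_pos hmem]
      simp
    have hB : PySem.Str.isIn ":" s = true := hIn.mpr hmem
    have hkey : PySem.Str.lower (PySem.List.pyGetD ((PySem.Str.splitMax? s ":" 1).getD []) 0 "") =
        String.ofList (PySem.Chars.lower (s.toList.takeWhile (· ≠ ':'))) := by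
      rw [hparts]
      show PySem.Str.lower (String.ofList (s.toList.takeWhile (· ≠ ':'))) = _
      simp [PySem.Str.lower]
    rw [hB]
    simp only [if_true]
    by_cases hm : PySem.Chars.lower (s.toList.takeWhile (· ≠ ':')) = "method".toList
    · have cm : PySem.Str.startswith (PySem.Str.lower s) "method:" = true := by
        rw [show ("method:" : String) = String.ofList ("method".toList ++ [':']) from rfl]
        exact (hsw "method".toList (by decide)).mpr ⟨hmem, hm⟩
      rw [cm]
      simp only [if_true]
      have hkm : PySem.Str.lower (PySem.List.pyGetD ((PySem.Str.splitMax? s ":" 1).getD []) 0 "") = "method" := by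
        rw [hkey, String.ofList_eq, hm]
      rw [hkm]
      simp only [Prod.mk.injEq]
      refine ⟨?_, ?_⟩
      · rw [PySem.Dict.getD_eq_get?_getD, PySem.Dict.get?_insert_self]
        rfl
      · conv_rhs => rw [PySem.Dict.getD_eq_get?_getD,
          PySem.Dict.get?_insert_of_ne _ _ (show ("account":String) ≠ "method" by decide)]
        rw [PySem.Dict.getD_eq_get?_getD]
    · by_cases ha : PySem.Chars.lower (s.toList.takeWhile (· ≠ ':')) = "account".toList
      · have cm : PySem.Str.startswith (PySem.Str.lower s) "method:" = false := by
          rw [show ("method:" : String) = String.ofList ("method".toList ++ [':']) from rfl,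
            Bool.eq_false_iff]
          intro h
          exact hm ((hsw "method".toList (by decide)).mp h).2
        have ca : PySem.Str.startswith (PySem.Str.lower s) "account:" = true := by
          rw [show ("account:" : String) = String.ofList ("account".toList ++ [':']) from rfl]
          exact (hsw "account".toList (by decide)).mpr ⟨hmem, ha⟩
        rw [cm, ca]
        simp only [Bool.false_eq_true, if_false, if_true]
        have hka : PySem.Str.lower (PySem.List.pyGetD ((PySem.Str.splitMax? s ":" 1).getD []) 0 "") = "account" := by
          rw [hkey, String.ofList_eq, ha]
        rw [hka]
        simp only [Prod.mk.injEq]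
        refine ⟨?_, ?_⟩
        · conv_rhs => rw [PySem.Dict.getD_eq_get?_getD,
            PySem.Dict.get?_insert_of_ne _ _ (show ("method":String) ≠ "account" by decide)]
          rw [PySem.Dict.getD_eq_get?_getD]
        · rw [PySem.Dict.getD_eq_get?_getD, PySem.Dict.get?_insert_self]
          rfl
      · have cm : PySem.Str.startswith (PySem.Str.lower s) "method:" = false := by
          rw [show ("method:" : String) = String.ofList ("method".toList ++ [':']) from rfl,
            Bool.eq_false_iff]
          intro h
          exact hm ((hsw "method".toList (by decide)).mp h).2
        have ca : PySem.Str.startswith (PySem.Str.lower s) "account:" = false := by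
          rw [show ("account:" : String) = String.ofList ("account".toList ++ [':']) from rfl,
            Bool.eq_false_iff]
          intro h
          exact ha ((hsw "account".toList (by decide)).mp h).2
        rw [cm, ca]
        simp only [Bool.false_eq_true, if_false]
        have hkm : PySem.Str.lower (PySem.List.pyGetD ((PySem.Str.splitMax? s ":" 1).getD []) 0 "") ≠ "method" := by
          rw [hkey]
          exact fun he => hm (String.ofList_eq.mp he)
        have hka : PySem.Str.lower (PySem.List.pyGetD ((PySem.Str.splitMax? s ":" 1).getD []) 0 "") ≠ "account" := by
          rw [hkey]
          exact fun he => ha (String.ofList_eq.mp he)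
        simp only [Prod.mk.injEq]
        refine ⟨?_, ?_⟩
        · conv_rhs => rw [PySem.Dict.getD_eq_get?_getD,
            PySem.Dict.get?_insert_of_ne _ _ (Ne.symm hkm)]
          rw [PySem.Dict.getD_eq_get?_getD]
        · conv_rhs => rw [PySem.Dict.getD_eq_get?_getD,
            PySem.Dict.get?_insert_of_ne _ _ (Ne.symm hka)]
          rw [PySem.Dict.getD_eq_get?_getD]
  · have cm : PySem.Str.startswith (PySem.Str.lower s) "method:" = false := by
      rw [show ("method:" : String) = String.ofList ("method".toList ++ [':']) from rfl,
        Bool.eq_false_iff]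
      intro h
      exact hmem ((hsw "method".toList (by decide)).mp h).1
    have ca : PySem.Str.startswith (PySem.Str.lower s) "account:" = false := by
      rw [show ("account:" : String) = String.ofList ("account".toList ++ [':']) from rfl,
        Bool.eq_false_iff]
      intro h
      exact hmem ((hsw "account".toList (by decide)).mp h).1
    have hB : PySem.Str.isIn ":" s = false := by
      rw [Bool.eq_false_iff]; intro h; exact hmem (hIn.mp h)
    rw [cm, ca, hB]
    simp only [Bool.false_eq_true, if_false]


lemma loop_eq (lines : List String) : ∀ (d : PySem.Dict String String),
    lines.foldl pyA_line (d.getD "method" "", d.getD "account" "") =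
      ((lines.foldl pyB_line d).getD "method" "", (lines.foldl pyB_line d).getD "account" "") := by
  induction lines with
  | nil => intro d; rfl
  | cons line rest ih =>
    intro d
    simp only [List.foldl_cons, step_eq d line]
    exact ih (pyB_line d line)

-- ===== VERDICT (by name: the statement is the Claim_ definition above) =====
theorem parse_withdraw_details_py_spec : Claim_equal_parse_withdraw_details_py := by
  intro details _
  unfold Spec_parse_withdraw_details_py parse_withdraw_details_py parse_withdraw_details_py_alt
  by_cases h : details = ""
  · subst h; rfl
  · simp only [if_neg h]
    have := loop_eq (PySem.Str.splitlines details) PySem.Dict.empty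
    simpa [PySem.Dict.getD_empty] using this
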